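-- pv_equiv track=rewrite | github.com/matheushnobre/treinamento-maratona-programacao | beecrowd/python/grafos/ex3067.py | bfs
-- ===== SOURCE A (Python) =====
-- def verificaInicial(pecas):
--     impares = 0
--     for p in range(7):
--         if len(pecas[p]) % 2 == 1:
--             impares += 1
--     return impares == 0 or impares == 2
--
-- def bfs(pecas):
--     if not verificaInicial(pecas):
--         return False
--
--     fila = []
--     visitados = [0] * 7
--     for p in range(7):
--         if len(pecas[p]) > 0:
--             fila.append(p)
--             break
--     visitados[p] = 1
--
--     while len(fila) != 0:
--         p = fila[0]
--         del fila[0]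
--
--         if len(pecas[p]) == 0:
--             break
--
--         for a, b in pecas[p]:
--             if visitados[b] == 0:
--                 visitados[b] = 1
--                 fila.append(b)
--
--     for p in range(7):
--         if len(pecas[p]) > 0 and not visitados[p]:
--             return False
--
--     return True
-- ===== SOURCE B (Python) =====
-- def bfs(pecas):
--     impares = sum(len(pecas[p]) % 2 for p in range(7))
--     if impares not in (0, 2):
--         return False
--     start = next((p for p in range(7) if pecas[p]), None)
--     if start is None:
--         return True
--     visited = {start}
--     for _ in range(7):
--         visited |= {b for p in visited for (_a, b) in pecas[p]}
--     return all(not pecas[p] or p in visited for p in range(7))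
-- ===== Notes on version B (the rewrite author's own statement) =====
-- stated objective: simpler
-- what changed: The queue-and-visited-array BFS is replaced by a bounded fixed-point iteration: starting from the first non-empty value, the visited set is closed under edge targets for 7 rounds, then every value holding a piece is checked for membership; the parity gate becomes a plain sum of length parities. Pre_ restricts to well-formed domino tables (at least 7 rows, every piece's second component in 0..6 and pointing at a non-empty row) — the problem's actual input shape; …
-- outside the precondition, e.g. on bfs([[(0, -1)], [], [], [], [], [], [(6, 0)]]): A returns True, B returns False; on bfs([[(0, 1), (0, 3)], [], [], [(3, 4)], [(4, 3)], [], []]): A returns False, B returns True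
import Mathlib
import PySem

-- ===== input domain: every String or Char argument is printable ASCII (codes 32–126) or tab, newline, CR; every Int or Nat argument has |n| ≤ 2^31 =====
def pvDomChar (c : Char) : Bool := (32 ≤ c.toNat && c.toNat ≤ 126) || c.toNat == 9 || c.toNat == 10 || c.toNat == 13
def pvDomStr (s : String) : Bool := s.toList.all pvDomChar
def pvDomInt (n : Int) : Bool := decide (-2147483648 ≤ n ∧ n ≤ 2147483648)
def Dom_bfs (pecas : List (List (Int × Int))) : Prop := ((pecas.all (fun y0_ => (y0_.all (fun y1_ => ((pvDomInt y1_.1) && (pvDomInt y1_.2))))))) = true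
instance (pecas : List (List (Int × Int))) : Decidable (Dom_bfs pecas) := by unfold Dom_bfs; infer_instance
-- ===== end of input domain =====

-- B replaces A's queue BFS by a 7-round fixed-point closure of the visited set (simpler, no queue/array);
-- the parity gate becomes a sum of length parities.  Equivalence is proved on Pre_bfs (well-formed tables).

-- ===== PORT A =====
-- pecas[p], total form (Python raises out of range; Pre_ keeps every access in range)
def pyRow (pecas : List (List (Int × Int))) (p : Int) : List (Int × Int) :=
  (PySem.List.pyGet? pecas p).getD []

def verificaInicial (pecas : List (List (Int × Int))) : Bool :=
  let impares := (PySem.List.pyRange 0 7 1).foldl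
    (fun (imp : Int) p => if (pyRow pecas p).length % 2 == 1 then imp + 1 else imp) 0
  impares == 0 || impares == 2

-- body of A's inner 'for a, b in pecas[p]' loop: mark and enqueue an unvisited b
def bfsStep (st : List Int × List Int) (ab : Int × Int) : List Int × List Int :=
  if PySem.List.pyGetD st.2 ab.2 1 == 0 then
    (st.1 ++ [ab.2], PySem.List.pySetD st.2 ab.2 1)
  else st

-- measure for A's while loop: queue length + number of unvisited cells (each step pops one,
-- and every push marks a 0 to 1); bfsStep preserves it, so popping strictly decreases it
theorem count_set_zero (l : List Int) (j : Nat) (h : j < l.length) (hv : l[j] = 0) :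
    (l.set j 1).count 0 + 1 = l.count 0 := by
  rw [List.set_eq_take_cons_drop _ h]
  conv_rhs => rw [← List.take_append_drop j l, List.drop_eq_getElem_cons h, hv]
  simp [List.count_append]
  omega

theorem bfsStep_measure (st : List Int × List Int) (ab : Int × Int) :
    (bfsStep st ab).1.length + (bfsStep st ab).2.count 0 = st.1.length + st.2.count 0 := by
  unfold bfsStep
  cases hk : PySem.List.pyIdx? st.2.length ab.2 with
  | none => simp [PySem.List.pyGetD, PySem.List.pyGet?, hk]
  | some k =>
    cases hg : st.2[k]? with
    | none => simp [PySem.List.pyGetD, PySem.List.pyGet?, hk, hg]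
    | some v =>
      have hlt : k < st.2.length := by have := List.getElem?_eq_some_iff.mp hg; exact this.choose
      by_cases hv : v = 0
      · subst hv
        simp only [PySem.List.pyGetD, PySem.List.pyGet?, PySem.List.pySetD, PySem.List.pySet?,
          hk, hg, Option.bind_some, Option.getD_some, Option.map_some]
        simp only [beq_self_eq_true, if_pos]
        have := count_set_zero st.2 k hlt (by
          have := List.getElem?_eq_some_iff.mp hg; exact this.choose_spec)
        simp [List.length_append]
        omega
      · simp [PySem.List.pyGetD, PySem.List.pyGet?, hk, hg, hv]

theorem bfsFold_measure (l : List (Int × Int)) (st : List Int × List Int) :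
    (l.foldl bfsStep st).1.length + (l.foldl bfsStep st).2.count 0 = st.1.length + st.2.count 0 := by
  induction l generalizing st with
  | nil => rfl
  | cons ab l ih => rw [List.foldl_cons, ih, bfsStep_measure]

-- A's 'while len(fila) != 0' loop, returning the final visitados
def bfsLoop (pecas : List (List (Int × Int))) (fila vis : List Int) : List Int :=
  match fila with
  | [] => vis
  | p :: rest =>
    if (pyRow pecas p).length = 0 then vis
    else
      let st := (pyRow pecas p).foldl bfsStep (rest, vis)
      bfsLoop pecas st.1 st.2
termination_by fila.length + vis.count 0
decreasing_by
  rw [bfsFold_measure]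
  simp

def bfs (pecas : List (List (Int × Int))) : Bool :=
  if !(verificaInicial pecas) then false
  else
    -- 'for p in range(7): if len(pecas[p]) > 0: fila.append(p); break' — p keeps its last value (6) if nothing found
    let start? := (PySem.List.pyRange 0 7 1).find? (fun p => decide (0 < (pyRow pecas p).length))
    let fila : List Int := match start? with | some p => [p] | none => []
    let vis := PySem.List.pySetD [0, 0, 0, 0, 0, 0, 0] (start?.getD 6) 1
    let visF := bfsLoop pecas fila vis
    (PySem.List.pyRange 0 7 1).all (fun p =>
      !(decide (0 < (pyRow pecas p).length) && (PySem.List.pyGetD visF p 0 == 0)))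

-- ===== PORT B =====
-- one closure round: visited |= {b for p in visited for (_a, b) in pecas[p]}
def closeStep (pecas : List (List (Int × Int))) (vs : PySem.Set Int) : PySem.Set Int :=
  PySem.Set.update vs (vs.flatMap (fun p => (pyRow pecas p).map (·.2)))

def bfs_alt (pecas : List (List (Int × Int))) : Bool :=
  let impares := ((PySem.List.pyRange 0 7 1).map (fun p => (pyRow pecas p).length % 2)).sum
  if impares ≠ 0 ∧ impares ≠ 2 then false
  else
    match (PySem.List.pyRange 0 7 1).find? (fun p => !(pyRow pecas p).isEmpty) with
    | none => true
    | some s =>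
      let visited := (List.range 7).foldl (fun vs _ => closeStep pecas vs) (PySem.Set.ofList [s])
      (PySem.List.pyRange 0 7 1).all (fun p =>
        (pyRow pecas p).isEmpty || PySem.Set.contains visited p)

-- ===== PRECONDITION & SPEC =====
-- Pre_ = well-formed domino tables (the problem's input shape): at least the 7 rows A indexes, and — on
-- tables whose number of odd rows lets the parity gate pass (0 or 2; otherwise A answers from lengths alone) —
-- every piece's second component a value 0..6 whose row is non-empty.  It excludes inputs on which A still
-- returns: there A's negative-index wraparound and its early-break directed BFS give order-dependent
-- accidental results.
def Pre_bfs (pecas : List (List (Int × Int))) : Prop :=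
  7 ≤ pecas.length ∧
  (((List.range 7).countP (fun k => (pecas.getD k []).length % 2 == 1) = 0 ∨
    (List.range 7).countP (fun k => (pecas.getD k []).length % 2 == 1) = 2) →
    ∀ l ∈ pecas.take 7, ∀ ab ∈ l,
      0 ≤ ab.2 ∧ ab.2 < 7 ∧ pecas.getD ab.2.toNat [] ≠ [])
instance (pecas : List (List (Int × Int))) : Decidable (Pre_bfs pecas) := by
  unfold Pre_bfs; infer_instance

def pvWitness_bfs : (List (List (Int × Int))) := [[(0, 1)], [(1, 0)], [], [], [], [], []]

def Spec_bfs (pecas : List (List (Int × Int))) (out : Bool) : Prop := out = bfs_alt pecas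
instance (pecas : List (List (Int × Int))) (out : Bool) : Decidable (Spec_bfs pecas out) := by
  unfold Spec_bfs; infer_instance

-- ===== CLAIM (what is proved, stated in full; the proofs are below) =====
def Claim_equal_bfs : Prop := ∀ (pecas : List (List (Int × Int))), Dom_bfs pecas → Pre_bfs pecas → Spec_bfs pecas (bfs pecas)

-- ===== LEMMAS AND PROOFS =====

-- edges of the piece graph: p -> b whenever some (a, b) is stored in row p
def Edge (pecas : List (List (Int × Int))) (p b : Int) : Prop :=
  ∃ ab ∈ pyRow pecas p, ab.2 = b

-- reachability from s along Edge (what both the BFS and the closure compute)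
inductive Reach (pecas : List (List (Int × Int))) (s : Int) : Int → Prop
  | refl : Reach pecas s s
  | step {p b : Int} : Reach pecas s p → Edge pecas p b → Reach pecas s b

theorem pre_row (pecas : List (List (Int × Int))) (hlen : 7 ≤ pecas.length)
    (h : ∀ l ∈ pecas.take 7, ∀ ab ∈ l, 0 ≤ ab.2 ∧ ab.2 < 7 ∧ pecas.getD ab.2.toNat [] ≠ [])
    (p : Int) (h0 : 0 ≤ p) (h7 : p < 7) :
    ∀ ab ∈ pyRow pecas p, 0 ≤ ab.2 ∧ ab.2 < 7 ∧ pyRow pecas ab.2 ≠ [] := by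
  intro ab hab
  have hp : p.toNat < pecas.length := by omega
  have hp7 : p.toNat < 7 := by omega
  have hrow : pyRow pecas p = pecas[p.toNat] := by
    simp [pyRow, PySem.List.pyGet?_of_nonneg _ h0, List.getElem?_eq_getElem hp]
  have hmem : pecas[p.toNat] ∈ pecas.take 7 := by
    have : (pecas.take 7)[p.toNat]'(by simp; omega) = pecas[p.toNat] := List.getElem_take
    exact this ▸ List.getElem_mem _
  obtain ⟨hb0, hb7, hne⟩ := h _ hmem ab (hrow ▸ hab)
  refine ⟨hb0, hb7, ?_⟩
  have heq : pyRow pecas ab.2 = pecas.getD ab.2.toNat [] := by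
    simp [pyRow, PySem.List.pyGet?_of_nonneg _ hb0, List.getD]
  rw [heq]; exact hne

theorem getD_set_one (v : List Int) (j k : Nat) (hj : j < v.length) :
    (v.set j 1).getD k 0 = if k = j then 1 else v.getD k 0 := by
  by_cases h : k = j
  · subst h; simp [List.getD, List.getElem?_set_self hj]
  · simp [List.getD, List.getElem?_set_ne (fun a => h a.symm), h]

theorem bfsStep_eq (f v : List Int) (ab : Int × Int) (hv : v.length = 7)
    (h0 : 0 ≤ ab.2) (h7 : ab.2 < 7) :
    bfsStep (f, v) ab =
      if v.getD ab.2.toNat 0 = 0 then (f ++ [ab.2], v.set ab.2.toNat 1) else (f, v) := by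
  have hidx : PySem.List.pyIdx? v.length ab.2 = some ab.2.toNat := by
    rw [hv]; simp only [PySem.List.pyIdx?, if_pos h0]
    rw [if_pos (by exact_mod_cast h7)]
  have hk : ab.2.toNat < v.length := by omega
  unfold bfsStep
  simp [PySem.List.pyGetD, PySem.List.pyGet?, PySem.List.pySetD, PySem.List.pySet?, hidx,
    List.getElem?_eq_getElem hk, List.getD]

-- invariant carried by A's while loop
def BfsInv (pecas : List (List (Int × Int))) (s : Int) (fila vis : List Int) : Prop :=
  vis.length = 7 ∧
  (∀ j : Nat, j < 7 → vis.getD j 0 = 0 ∨ vis.getD j 0 = 1) ∧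
  (∀ p ∈ fila, 0 ≤ p ∧ p < 7 ∧ vis.getD p.toNat 0 = 1 ∧ pyRow pecas p ≠ []) ∧
  (∀ j : Nat, j < 7 → vis.getD j 0 = 1 → Reach pecas s (j : Int)) ∧
  (∀ j : Nat, j < 7 → vis.getD j 0 = 1 →
    (j : Int) ∈ fila ∨ ∀ b, Edge pecas (j : Int) b → 0 ≤ b ∧ b < 7 ∧ vis.getD b.toNat 0 = 1) ∧
  vis.getD s.toNat 0 = 1

theorem bfsFold_inv (pecas : List (List (Int × Int))) (s : Int) :
    ∀ (l : List (Int × Int)) (f v : List Int),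
    (∀ ab ∈ l, (0 ≤ ab.2 ∧ ab.2 < 7 ∧ pyRow pecas ab.2 ≠ []) ∧ Reach pecas s ab.2) →
    v.length = 7 →
    (∀ j : Nat, j < 7 → v.getD j 0 = 0 ∨ v.getD j 0 = 1) →
    (∀ p ∈ f, 0 ≤ p ∧ p < 7 ∧ v.getD p.toNat 0 = 1 ∧ pyRow pecas p ≠ []) →
    (∀ j : Nat, j < 7 → v.getD j 0 = 1 → Reach pecas s (j : Int)) →
    (l.foldl bfsStep (f, v)).2.length = 7 ∧
    (∀ j : Nat, j < 7 → (l.foldl bfsStep (f, v)).2.getD j 0 = 0 ∨ (l.foldl bfsStep (f, v)).2.getD j 0 = 1) ∧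
    (∀ p ∈ (l.foldl bfsStep (f, v)).1, 0 ≤ p ∧ p < 7 ∧ (l.foldl bfsStep (f, v)).2.getD p.toNat 0 = 1 ∧ pyRow pecas p ≠ []) ∧
    (∀ j : Nat, j < 7 → (l.foldl bfsStep (f, v)).2.getD j 0 = 1 → Reach pecas s (j : Int)) ∧
    (∀ j : Nat, j < 7 → v.getD j 0 = 1 → (l.foldl bfsStep (f, v)).2.getD j 0 = 1) ∧
    (∀ q ∈ f, q ∈ (l.foldl bfsStep (f, v)).1) ∧
    (∀ j : Nat, j < 7 → (l.foldl bfsStep (f, v)).2.getD j 0 = 1 → v.getD j 0 = 1 ∨ (j : Int) ∈ (l.foldl bfsStep (f, v)).1) ∧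
    (∀ ab ∈ l, (l.foldl bfsStep (f, v)).2.getD ab.2.toNat 0 = 1) := by
  intro l
  induction l with
  | nil =>
    intro f v hl hv h01 hq hsound
    exact ⟨hv, h01, hq, hsound, fun j _ h => h, fun q hq => hq, fun j _ h => Or.inl h, by simp⟩
  | cons ab l ih =>
    intro f v hl hv h01 hq hsound
    obtain ⟨⟨hb0, hb7, hbne⟩, hbr⟩ := hl ab (by simp)
    have hbk : ab.2.toNat < 7 := by omega
    have hcast : ((ab.2.toNat : Nat) : Int) = ab.2 := Int.toNat_of_nonneg hb0
    rw [List.foldl_cons, bfsStep_eq f v ab hv hb0 hb7]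
    by_cases hm : v.getD ab.2.toNat 0 = 0
    · rw [if_pos hm]
      have hv' : (v.set ab.2.toNat 1).length = 7 := by simp [hv]
      have hget : ∀ k : Nat, (v.set ab.2.toNat 1).getD k 0 = if k = ab.2.toNat then 1 else v.getD k 0 :=
        fun k => getD_set_one v ab.2.toNat k (by omega)
      have h01' : ∀ j : Nat, j < 7 → (v.set ab.2.toNat 1).getD j 0 = 0 ∨ (v.set ab.2.toNat 1).getD j 0 = 1 := by
        intro j hj; rw [hget j]; split
        · exact Or.inr rfl
        · exact h01 j hj
      have hq' : ∀ p ∈ f ++ [ab.2], 0 ≤ p ∧ p < 7 ∧ (v.set ab.2.toNat 1).getD p.toNat 0 = 1 ∧ pyRow pecas p ≠ [] := by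
        intro p hp
        rcases List.mem_append.mp hp with hp | hp
        · obtain ⟨p0, p7, pm, pne⟩ := hq p hp
          refine ⟨p0, p7, ?_, pne⟩
          rw [hget]; split <;> [rfl; exact pm]
        · rw [List.mem_singleton.mp hp]
          refine ⟨hb0, hb7, ?_, hbne⟩
          rw [hget]; simp
      have hsound' : ∀ j : Nat, j < 7 → (v.set ab.2.toNat 1).getD j 0 = 1 → Reach pecas s (j : Int) := by
        intro j hj hm1
        rw [hget] at hm1
        by_cases hje : j = ab.2.toNat
        · subst hje; rw [hcast]; exact hbr
        · rw [if_neg hje] at hm1; exact hsound j hj hm1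
      obtain ⟨c_len, c_01, c_q, c_sound, c_mono, c_sub, c_new, c_cov⟩ :=
        ih (f ++ [ab.2]) (v.set ab.2.toNat 1) (fun x hx => hl x (by simp [hx])) hv' h01' hq' hsound'
      refine ⟨c_len, c_01, c_q, c_sound, ?_, ?_, ?_, ?_⟩
      · intro j hj hm1
        exact c_mono j hj (by rw [hget]; split <;> [rfl; exact hm1])
      · intro q hqf; exact c_sub q (by simp [hqf])
      · intro j hj hm1
        rcases c_new j hj hm1 with hold | hin
        · rw [hget] at hold
          by_cases hje : j = ab.2.toNat
          · subst hje
            exact Or.inr (by rw [hcast]; exact c_sub ab.2 (by simp))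
          · rw [if_neg hje] at hold; exact Or.inl hold
        · exact Or.inr hin
      · intro x hx
        rcases List.mem_cons.mp hx with hx | hx
        · subst hx
          exact c_mono x.2.toNat hbk (by rw [hget]; simp)
        · exact c_cov x hx
    · rw [if_neg hm]
      have hm1 : v.getD ab.2.toNat 0 = 1 := by rcases h01 ab.2.toNat hbk with h | h <;> [exact absurd h hm; exact h]
      obtain ⟨c_len, c_01, c_q, c_sound, c_mono, c_sub, c_new, c_cov⟩ :=
        ih f v (fun x hx => hl x (by simp [hx])) hv h01 hq hsound
      refine ⟨c_len, c_01, c_q, c_sound, c_mono, c_sub, c_new, ?_⟩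
      intro x hx
      rcases List.mem_cons.mp hx with hx | hx
      · subst hx; exact c_mono x.2.toNat hbk hm1
      · exact c_cov x hx

theorem bfsLoop_char (pecas : List (List (Int × Int))) (s : Int) (hlen7 : 7 ≤ pecas.length)
    (hwf : ∀ l ∈ pecas.take 7, ∀ ab ∈ l, 0 ≤ ab.2 ∧ ab.2 < 7 ∧ pecas.getD ab.2.toNat [] ≠ [])
    (hs0 : 0 ≤ s) (hs7 : s < 7) :
    ∀ fila vis, BfsInv pecas s fila vis →
      (bfsLoop pecas fila vis).length = 7 ∧
      (∀ j : Nat, j < 7 → (bfsLoop pecas fila vis).getD j 0 = 0 ∨ (bfsLoop pecas fila vis).getD j 0 = 1) ∧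
      (∀ j : Nat, j < 7 → ((bfsLoop pecas fila vis).getD j 0 = 1 ↔ Reach pecas s (j : Int))) := by
  intro fila vis
  induction fila, vis using bfsLoop.induct pecas with
  | case1 vis =>
    intro ⟨hlen, h01, _, hsound, hfront, hsm⟩
    rw [show bfsLoop pecas [] vis = vis from by unfold bfsLoop; rfl]
    refine ⟨hlen, h01, fun j hj => ⟨hsound j hj, fun hr => ?_⟩⟩
    have hclosed : ∀ x, Reach pecas s x → 0 ≤ x ∧ x < 7 ∧ vis.getD x.toNat 0 = 1 := by
      intro x hx
      induction hx with
      | refl => exact ⟨hs0, hs7, hsm⟩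
      | @step p b hp he ih =>
        obtain ⟨p0, p7, pm⟩ := ih
        have hc : ((p.toNat : Nat) : Int) = p := Int.toNat_of_nonneg p0
        rcases hfront p.toNat (by omega) pm with hin | hcl
        · rw [hc] at hin; exact absurd hin (List.not_mem_nil)
        · rw [hc] at hcl
          obtain ⟨b0, b7, bm⟩ := hcl b he
          exact ⟨b0, b7, bm⟩
    have := hclosed _ hr
    rw [Int.toNat_natCast] at this
    exact this.2.2
  | case2 vis p rest hz =>
    intro ⟨_, _, hq, _⟩
    exact absurd (List.eq_nil_of_length_eq_zero hz) (hq p (by simp)).2.2.2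
  | case3 vis p rest hz st ih =>
    intro ⟨hlen, h01, hq, hsound, hfront, hsm⟩
    obtain ⟨p0, p7, pm, _⟩ := hq p (by simp)
    have hrowfacts := pre_row pecas hlen7 hwf p p0 p7
    have hpr : Reach pecas s p := by
      have := hsound p.toNat (by omega) pm
      rwa [Int.toNat_of_nonneg p0] at this
    have hl : ∀ ab ∈ pyRow pecas p, (0 ≤ ab.2 ∧ ab.2 < 7 ∧ pyRow pecas ab.2 ≠ []) ∧ Reach pecas s ab.2 := by
      intro ab hab
      exact ⟨hrowfacts ab hab, Reach.step hpr ⟨ab, hab, rfl⟩⟩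
    obtain ⟨c_len, c_01, c_q, c_sound, c_mono, c_sub, c_new, c_cov⟩ :=
      bfsFold_inv pecas s (pyRow pecas p) rest vis hl hlen h01
        (fun q hqm => hq q (by simp [hqm])) hsound
    have hinv' : BfsInv pecas s (List.foldl bfsStep (rest, vis) (pyRow pecas p)).1
        (List.foldl bfsStep (rest, vis) (pyRow pecas p)).2 := by
      refine ⟨c_len, c_01, c_q, c_sound, ?_, c_mono s.toNat (by omega) hsm⟩
      intro j hj hm1
      rcases c_new j hj hm1 with hold | hin
      · rcases hfront j hj hold with hin | hcl
        · rcases List.mem_cons.mp hin with hjp | hjr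
          · right
            intro b hb
            obtain ⟨ab, hab, habe⟩ := hjp ▸ hb
            obtain ⟨b0, b7, _⟩ := hrowfacts ab hab
            exact ⟨habe ▸ b0, habe ▸ b7, habe ▸ c_cov ab hab⟩
          · exact Or.inl (c_sub _ hjr)
        · right
          intro b hb
          obtain ⟨b0, b7, bm⟩ := hcl b hb
          exact ⟨b0, b7, c_mono b.toNat (by omega) bm⟩
      · exact Or.inl hin
    rw [show bfsLoop pecas (p :: rest) vis =
        bfsLoop pecas (List.foldl bfsStep (rest, vis) (pyRow pecas p)).1
          (List.foldl bfsStep (rest, vis) (pyRow pecas p)).2 from by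
      conv_lhs => unfold bfsLoop
      rw [if_neg hz]]
    exact ih hinv'

-- ---- B side: the 7-round closure computes the same reachable set ----

theorem mem_closeStep (pecas : List (List (Int × Int))) (vs : PySem.Set Int) (x : Int) :
    x ∈ closeStep pecas vs ↔ x ∈ vs ∨ ∃ p ∈ vs, Edge pecas p x := by
  simp [closeStep, PySem.Set.mem_update, List.mem_flatMap, Edge]

theorem update_append (xs : List Int) : ∀ s : PySem.Set Int, ∃ t, PySem.Set.update s xs = s ++ t := by
  induction xs with
  | nil => exact fun s => ⟨[], by simp [PySem.Set.update]⟩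
  | cons x xs ih =>
    intro s
    simp only [PySem.Set.update, List.foldl_cons]
    by_cases hc : s.contains x = true
    · rw [show PySem.Set.add s x = s by unfold PySem.Set.add; rw [if_pos hc]]
      exact ih s
    · rw [show PySem.Set.add s x = s ++ [x] by unfold PySem.Set.add; rw [if_neg hc]]
      rcases ih (s ++ [x]) with ⟨t, ht⟩
      exact ⟨[x] ++ t, by rw [show List.foldl PySem.Set.add (s ++ [x]) xs = s ++ [x] ++ t from ht, List.append_assoc]⟩

theorem closeStep_mono (pecas : List (List (Int × Int))) (vs : PySem.Set Int) :
    ∃ t, closeStep pecas vs = vs ++ t := update_append _ vs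

theorem foldl_ignore {β : Type} (g : β → β) :
    ∀ (l : List Nat) (init : β), l.foldl (fun vs _ => g vs) init = g^[l.length] init := by
  intro l
  induction l with
  | nil => intro init; rfl
  | cons x l ih => intro init; simp [List.foldl_cons, ih, Function.iterate_succ_apply]

theorem closure_char (pecas : List (List (Int × Int))) (s : Int) (hlen : 7 ≤ pecas.length)
    (hwf : ∀ l ∈ pecas.take 7, ∀ ab ∈ l, 0 ≤ ab.2 ∧ ab.2 < 7 ∧ pecas.getD ab.2.toNat [] ≠ []) (hs0 : 0 ≤ s) (hs7 : s < 7) :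
    ∀ x, x ∈ (List.range 7).foldl (fun vs _ => closeStep pecas vs) (PySem.Set.ofList [s]) ↔
      Reach pecas s x := by
  have hV0 : PySem.Set.ofList [s] = [s] := by
    simp [PySem.Set.ofList, PySem.Set.empty, PySem.Set.add, PySem.Set.contains]
  rw [foldl_ignore (closeStep pecas) (List.range 7) (PySem.Set.ofList [s]), List.length_range]
  have hmem : ∀ k, ∀ x ∈ (closeStep pecas)^[k] (PySem.Set.ofList [s]),
      (0 ≤ x ∧ x < 7) ∧ Reach pecas s x := by
    intro k
    induction k with
    | zero =>
      intro x hx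
      rw [Function.iterate_zero_apply, hV0, List.mem_singleton] at hx
      subst hx
      exact ⟨⟨hs0, hs7⟩, Reach.refl⟩
    | succ k ih =>
      intro x hx
      rw [Function.iterate_succ_apply'] at hx
      rcases (mem_closeStep pecas _ x).mp hx with hx | ⟨p, hpv, he⟩
      · exact ih x hx
      · obtain ⟨⟨p0, p7⟩, hpr⟩ := ih p hpv
        obtain ⟨ab, hab, habe⟩ := he
        obtain ⟨b0, b7, _⟩ := pre_row pecas hlen hwf p p0 p7 ab hab
        exact ⟨⟨habe ▸ b0, habe ▸ b7⟩, Reach.step hpr ⟨ab, hab, habe⟩⟩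
  have hmono : ∀ k x, x ∈ (closeStep pecas)^[k] (PySem.Set.ofList [s]) →
      x ∈ (closeStep pecas)^[k + 1] (PySem.Set.ofList [s]) := by
    intro k x hx
    rw [Function.iterate_succ_apply']
    obtain ⟨t, ht⟩ := closeStep_mono pecas ((closeStep pecas)^[k] (PySem.Set.ofList [s]))
    rw [ht]
    exact List.mem_append_left _ hx
  have hupto : ∀ k m, k ≤ m → ∀ x, x ∈ (closeStep pecas)^[k] (PySem.Set.ofList [s]) →
      x ∈ (closeStep pecas)^[m] (PySem.Set.ofList [s]) := by
    intro k m hkm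
    induction m, hkm using Nat.le_induction with
    | base => exact fun x hx => hx
    | succ m hm ih => exact fun x hx => hmono m x (ih x hx)
  have hnodup : ∀ k, ((closeStep pecas)^[k] (PySem.Set.ofList [s])).Nodup := by
    intro k
    induction k with
    | zero => rw [Function.iterate_zero_apply, hV0]; simp
    | succ k ih =>
      rw [Function.iterate_succ_apply']
      exact PySem.Set.nodup_update _ _ ih
  have hlen7 : ∀ k, ((closeStep pecas)^[k] (PySem.Set.ofList [s])).length ≤ 7 := by
    intro k
    have hsub : (closeStep pecas)^[k] (PySem.Set.ofList [s]) ⊆ PySem.List.pyRange 0 7 1 := by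
      intro x hx
      exact (PySem.List.mem_pyRange_one).mpr ⟨(hmem k x hx).1.1, (hmem k x hx).1.2⟩
    have := (List.subperm_of_subset (hnodup k) hsub).length_le
    simpa [PySem.List.length_pyRange_one] using this
  have hstab : ∃ k, k < 7 ∧ closeStep pecas ((closeStep pecas)^[k] (PySem.Set.ofList [s])) =
      (closeStep pecas)^[k] (PySem.Set.ofList [s]) := by
    by_contra hcon
    rw [not_exists] at hcon
    simp only [not_and] at hcon
    have hgrow : ∀ k, k < 7 → ((closeStep pecas)^[k] (PySem.Set.ofList [s])).length + 1 ≤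
        ((closeStep pecas)^[k + 1] (PySem.Set.ofList [s])).length := by
      intro k hk
      obtain ⟨t, ht⟩ := closeStep_mono pecas ((closeStep pecas)^[k] (PySem.Set.ofList [s]))
      rw [Function.iterate_succ_apply', ht]
      cases t with
      | nil => exact absurd (by simpa using ht) (hcon k hk)
      | cons y t => simp
    have hge : ∀ k, k ≤ 7 → k + 1 ≤ ((closeStep pecas)^[k] (PySem.Set.ofList [s])).length := by
      intro k
      induction k with
      | zero => intro _; rw [Function.iterate_zero_apply, hV0]; simp
      | succ k ih =>
        intro hk7
        have h1 := hgrow k (by omega)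
        have h2 := ih (by omega)
        omega
    have := hge 7 le_rfl
    have := hlen7 7
    omega
  obtain ⟨k, hk7, hfix⟩ := hstab
  have heq : ∀ m, k ≤ m → (closeStep pecas)^[m] (PySem.Set.ofList [s]) =
      (closeStep pecas)^[k] (PySem.Set.ofList [s]) := by
    intro m hm
    induction m, hm using Nat.le_induction with
    | base => rfl
    | succ m hm ih => rw [Function.iterate_succ_apply', ih, hfix]
  have h7fix : closeStep pecas ((closeStep pecas)^[7] (PySem.Set.ofList [s])) =
      (closeStep pecas)^[7] (PySem.Set.ofList [s]) := by
    rw [heq 7 (by omega), hfix]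
  intro x
  constructor
  · intro hx; exact (hmem 7 x hx).2
  · intro hr
    induction hr with
    | refl =>
      exact hupto 0 7 (by omega) s (by rw [Function.iterate_zero_apply, hV0]; simp)
    | @step p b hp he ih =>
      rw [← h7fix]
      exact (mem_closeStep pecas _ b).mpr (Or.inr ⟨p, ih, he⟩)

-- ---- parity gate ----

theorem countP_bridge (pecas : List (List (Int × Int))) :
    (PySem.List.pyRange 0 7 1).countP (fun p => (pyRow pecas p).length % 2 == 1) =
      (List.range 7).countP (fun k => (pecas.getD k []).length % 2 == 1) := by
  rw [PySem.List.pyRange_one, List.countP_map]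
  rw [show ((7 : Int) - 0).toNat = 7 from rfl]
  apply List.countP_congr
  intro k _
  simp [Function.comp, pyRow, List.getD]

theorem parity_count (pecas : List (List (Int × Int))) (L : List Int) :
    (L.map (fun p => (pyRow pecas p).length % 2)).sum =
      L.countP (fun p => (pyRow pecas p).length % 2 == 1) := by
  induction L with
  | nil => rfl
  | cons p L ih =>
    have h2 := Nat.mod_two_eq_zero_or_one (pyRow pecas p).length
    rcases h2 with h | h <;> simp [List.countP_cons, h, ih] <;> omega

theorem all_ext (L : List Int) (f g : Int → Bool) (h : ∀ x ∈ L, f x = g x) :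
    L.all f = L.all g := by
  induction L with
  | nil => rfl
  | cons x L ih => simp only [List.all_cons, h x (by simp), ih (fun y hy => h y (by simp [hy]))]

-- ===== VERDICT (by name: the statement is the Claim_ definition above) =====
theorem bfs_spec : Claim_equal_bfs := by
  intro pecas _ hpre
  obtain ⟨hlen, himp⟩ := hpre
  unfold Spec_bfs bfs bfs_alt
  -- the two parity gates agree
  have hcnt := PySem.List.foldl_if_add_one
    (fun p => (pyRow pecas p).length % 2 == 1) (PySem.List.pyRange 0 7 1) 0
  have hsum := parity_count pecas (PySem.List.pyRange 0 7 1)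
  set c : Nat := (PySem.List.pyRange 0 7 1).countP (fun p => (pyRow pecas p).length % 2 == 1) with hc
  by_cases hgate : c = 0 ∨ c = 2
  case neg =>
    have hA : verificaInicial pecas = false := by
      unfold verificaInicial
      rw [hcnt]
      simp only [zero_add, Bool.or_eq_false_iff, beq_eq_false_iff_ne]
      omega
    have hBc : ((PySem.List.pyRange 0 7 1).map (fun p => (pyRow pecas p).length % 2)).sum ≠ 0 ∧
        ((PySem.List.pyRange 0 7 1).map (fun p => (pyRow pecas p).length % 2)).sum ≠ 2 := by
      rw [hsum]; omega
    rw [hA, if_pos hBc]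
    simp
  case pos =>
    have hA : verificaInicial pecas = true := by
      unfold verificaInicial
      rw [hcnt]
      rcases hgate with h | h <;> simp [h]
    have hBc : ¬(((PySem.List.pyRange 0 7 1).map (fun p => (pyRow pecas p).length % 2)).sum ≠ 0 ∧
        ((PySem.List.pyRange 0 7 1).map (fun p => (pyRow pecas p).length % 2)).sum ≠ 2) := by
      rw [hsum]; omega
    rw [hA, if_neg hBc]
    rw [show (!true) = false from rfl, if_neg (by simp)]
    have hwf : ∀ l ∈ pecas.take 7, ∀ ab ∈ l, 0 ≤ ab.2 ∧ ab.2 < 7 ∧ pecas.getD ab.2.toNat [] ≠ [] :=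
      himp (by rw [← countP_bridge pecas, ← hc]; exact hgate)
    -- the two start searches agree
    rw [show (fun p => !(pyRow pecas p).isEmpty) = (fun p => decide (0 < (pyRow pecas p).length))
      from funext fun p => by cases h : pyRow pecas p <;> simp [h]]
    cases hfind : (PySem.List.pyRange 0 7 1).find? (fun p => decide (0 < (pyRow pecas p).length)) with
    | none =>
      simp only [hfind]
      rw [show bfsLoop pecas [] (PySem.List.pySetD [0, 0, 0, 0, 0, 0, 0] ((none : Option Int).getD 6) 1)
          = PySem.List.pySetD [0, 0, 0, 0, 0, 0, 0] ((none : Option Int).getD 6) 1 from by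
        unfold bfsLoop; rfl]
      have hall := List.find?_eq_none.mp hfind
      apply List.all_eq_true.mpr
      intro p hp
      have : ¬ (0 < (pyRow pecas p).length) := by simpa using hall p hp
      simp [Nat.eq_zero_of_not_pos this]
    | some st =>
      simp only [hfind, Option.getD_some]
      obtain ⟨hs0, hs7⟩ := PySem.List.mem_pyRange_one.mp (List.mem_of_find?_eq_some hfind)
      have hsne : pyRow pecas st ≠ [] := by
        have := List.find?_some hfind
        simp only [decide_eq_true_eq] at this
        exact List.ne_nil_of_length_pos this
      have hstk : st.toNat < 7 := by omega
      have hcast : ((st.toNat : Nat) : Int) = st := Int.toNat_of_nonneg hs0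
      -- the initial visitados array
      have hbase : ∀ j : Nat, ([0, 0, 0, 0, 0, 0, 0] : List Int).getD j 0 = 0 := by
        intro j
        rcases j with _|_|_|_|_|_|_|j <;> rfl
      rw [PySem.List.pySetD_of_nonneg _ _ hs0]
      have hget0 : ∀ k : Nat, (([0, 0, 0, 0, 0, 0, 0] : List Int).set st.toNat 1).getD k 0 =
          if k = st.toNat then 1 else 0 := by
        intro k
        rw [getD_set_one _ _ _ (by simp; omega)]
        split <;> [rfl; exact hbase k]
      have hinv : BfsInv pecas st [st] (([0, 0, 0, 0, 0, 0, 0] : List Int).set st.toNat 1) := by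
        refine ⟨by simp, ?_, ?_, ?_, ?_, by rw [hget0]; simp⟩
        · intro j hj
          rw [hget0]
          split <;> [exact Or.inr rfl; exact Or.inl rfl]
        · intro p hp
          rw [List.mem_singleton.mp hp]
          exact ⟨hs0, hs7, by rw [hget0]; simp, hsne⟩
        · intro j hj hm
          rw [hget0] at hm
          by_cases hje : j = st.toNat
          · subst hje
            rw [hcast]
            exact Reach.refl
          · rw [if_neg hje] at hm
            exact absurd hm (by norm_num)
        · intro j hj hm
          rw [hget0] at hm
          by_cases hje : j = st.toNat
          · subst hje
            rw [hcast]
            exact Or.inl (by simp)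
          · rw [if_neg hje] at hm
            exact absurd hm (by norm_num)
      obtain ⟨hlenF, h01F, hcharF⟩ := bfsLoop_char pecas st hlen hwf hs0 hs7 [st] _ hinv
      have hcharB := closure_char pecas st hlen hwf hs0 hs7
      -- the two final scans agree pointwise
      apply all_ext
      intro p hp
      obtain ⟨hp0, hp7⟩ := PySem.List.mem_pyRange_one.mp hp
      cases he : pyRow pecas p with
      | nil => simp [he]
      | cons ab r =>
        have hpk : p.toNat < 7 := by omega
        have hpcast : ((p.toNat : Nat) : Int) = p := Int.toNat_of_nonneg hp0
        have hpg : PySem.List.pyGetD (bfsLoop pecas [st] (([0, 0, 0, 0, 0, 0, 0] : List Int).set st.toNat 1)) p 0 =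
            (bfsLoop pecas [st] (([0, 0, 0, 0, 0, 0, 0] : List Int).set st.toNat 1)).getD p.toNat 0 := by
          simp [PySem.List.pyGetD, PySem.List.pyGet?_of_nonneg _ hp0, List.getD]
        rw [hpg]
        by_cases hr : Reach pecas st p
        · have h1 : (bfsLoop pecas [st] (([0, 0, 0, 0, 0, 0, 0] : List Int).set st.toNat 1)).getD p.toNat 0 = 1 :=
            (hcharF p.toNat hpk).mpr (by rwa [hpcast])
          have hmem : p ∈ (List.range 7).foldl (fun vs _ => closeStep pecas vs) (PySem.Set.ofList [st]) :=
            (hcharB p).mpr hr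
          have h1' : ((bfsLoop pecas [st] (([0, 0, 0, 0, 0, 0, 0] : List Int).set st.toNat 1))[p.toNat]?).getD 0 = (1 : Int) := h1
          simp [h1', hmem]
        · have h0 : (bfsLoop pecas [st] (([0, 0, 0, 0, 0, 0, 0] : List Int).set st.toNat 1)).getD p.toNat 0 = 0 := by
            rcases h01F p.toNat hpk with h | h
            · exact h
            · exact absurd (by rw [← hpcast]; exact (hcharF p.toNat hpk).mp h) hr
          have hnm : p ∉ (List.range 7).foldl (fun vs _ => closeStep pecas vs) (PySem.Set.ofList [st]) :=
            fun hm => hr ((hcharB p).mp hm)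
          have h0' : ((bfsLoop pecas [st] (([0, 0, 0, 0, 0, 0, 0] : List Int).set st.toNat 1))[p.toNat]?).getD 0 = (0 : Int) := h0
          simp [h0', hnm]
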